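-- pv_equiv track=rewrite | github.com/sonic-net/sonic-mgmt | test_analyzer/pr_binary_search/binary_plan.py | compute_indices
-- ===== SOURCE A (Python) =====
-- from typing import List, Dict, Optional, Tuple
--
-- def compute_indices(left: int, right: int, f: int) -> List[int]:
--     """
--     Divide [left,right] into f segments (f>=1), return boundary point indices (length = f-1).
--     Each segment length differs by at most 1.
--     """
--     n = right - left + 1
--     if f <= 1 or n <= 1:
--         return []
--     q, r = divmod(n, f)
--     sizes = [q+1]*r + [q]*(f-r)
--     indices = []
--     prefix = 0
--     for j in range(len(sizes)-1):
--         prefix += sizes[j]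
--         idx = left + prefix - 1
--         if not indices or idx > indices[-1]:
--             indices.append(idx)
--     return indices
-- ===== SOURCE B (Python) =====
-- def compute_indices(left, right, f):
--     n = right - left + 1
--     if f <= 1 or n <= 1:
--         return []
--     q, r = divmod(n, f)
--     if q == 0:
--         # more segments than elements: every element is its own boundary
--         return list(range(left, right + 1))
--     return [left + k * q + min(k, r) - 1 for k in range(1, f)]
-- ===== Notes on version B (the rewrite author's own statement) =====
-- stated objective: simpler
-- what changed: Replaced the materialized sizes list, running prefix sum and last-element dedup guard by direct construction: when q=0 the result is exactly range(left, right+1), otherwise each boundary is the closed form left + k*q + min(k,r) - 1, so no loop state and no dedup are needed.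
import Mathlib
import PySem

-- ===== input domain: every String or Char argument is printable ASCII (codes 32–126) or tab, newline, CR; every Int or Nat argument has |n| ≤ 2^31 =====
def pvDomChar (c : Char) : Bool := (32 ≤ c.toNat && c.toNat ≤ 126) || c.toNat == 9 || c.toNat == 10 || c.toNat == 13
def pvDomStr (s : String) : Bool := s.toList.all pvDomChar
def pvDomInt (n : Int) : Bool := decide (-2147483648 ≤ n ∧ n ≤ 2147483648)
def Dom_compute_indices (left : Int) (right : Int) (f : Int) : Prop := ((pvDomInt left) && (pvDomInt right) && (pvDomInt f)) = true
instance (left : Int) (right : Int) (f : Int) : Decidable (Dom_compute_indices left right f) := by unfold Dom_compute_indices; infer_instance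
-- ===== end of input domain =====

-- B replaces A's sizes list, running prefix sum and dedup guard by direct construction
-- (range(left,right+1) when q=0, else closed-form boundaries): simpler, same cost.


-- ===== PORT A =====
def compute_indices (left : Int) (right : Int) (f : Int) : List Int :=
  let n := right - left + 1
  if f ≤ 1 ∨ n ≤ 1 then []
  else
    let q := PySem.Int.floordiv n f
    let r := PySem.Int.mod n f
    let sizes := List.replicate r.toNat (q + 1) ++ List.replicate (f - r).toNat q
    let st := (List.range (sizes.length - 1)).foldl
      (fun (st : Int × List Int) j =>
        let pfx := st.1 + sizes.getD j 0
        let idx := left + pfx - 1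
        if st.2 = [] ∨ idx > st.2.getLastD 0 then (pfx, st.2 ++ [idx])
        else (pfx, st.2))
      (0, [])
    st.2

-- ===== PORT B =====
def compute_indices_alt (left : Int) (right : Int) (f : Int) : List Int :=
  let n := right - left + 1
  if f ≤ 1 ∨ n ≤ 1 then []
  else
    let q := PySem.Int.floordiv n f
    let r := PySem.Int.mod n f
    if q = 0 then PySem.List.pyRange left (right + 1) 1
    else (PySem.List.pyRange 1 f 1).map (fun k => left + k * q + min k r - 1)

-- ===== PRECONDITION & SPEC =====
def Spec_compute_indices (left : Int) (right : Int) (f : Int) (out : List Int) : Prop := out = compute_indices_alt left right f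
instance (left : Int) (right : Int) (f : Int) (out : List Int) : Decidable (Spec_compute_indices left right f out) := by unfold Spec_compute_indices; infer_instance

-- ===== CLAIM (what is proved, stated in full; the proofs are below) =====
def Claim_equal_compute_indices : Prop := ∀ (left : Int) (right : Int) (f : Int), Dom_compute_indices left right f → Spec_compute_indices left right f (compute_indices left right f)

-- ===== LEMMAS AND PROOFS =====

-- closed form of A's loop output: the first M boundary points
def pvOut (left q r : Int) (M : Nat) : List Int :=
  (List.range M).map (fun (j : Nat) => left + ((j : Int) + 1) * q + min ((j : Int) + 1) r - 1)

theorem pvOut_ne_nil (left q r : Int) (M : Nat) (h : 0 < M) : pvOut left q r M ≠ [] := by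
  simp only [pvOut, ne_eq, List.map_eq_nil_iff, List.range_eq_nil]
  omega

theorem pvOut_getLastD (left q r : Int) (M : Nat) (h : 0 < M) :
    (pvOut left q r M).getLastD 0 = left + (M : Int) * q + min (M : Int) r - 1 := by
  obtain ⟨M', rfl⟩ : ∃ M', M = M' + 1 := ⟨M - 1, by omega⟩
  simp only [pvOut, List.range_succ, List.map_append, List.map_cons, List.map_nil,
    List.getLastD_concat]
  push_cast
  ring_nf

theorem pvOut_succ (left q r : Int) (M : Nat) :
    pvOut left q r (M + 1)
      = pvOut left q r M ++ [left + ((M : Int) + 1) * q + min ((M : Int) + 1) r - 1] := by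
  simp [pvOut, List.range_succ]

theorem pv_sizes_getD (q r : Int) (s j : Nat) (hj : j < r.toNat + s) :
    (List.replicate r.toNat (q + 1) ++ List.replicate s q).getD j 0
      = if j < r.toNat then q + 1 else q := by
  rcases lt_or_ge j r.toNat with h | h
  · rw [if_pos h, List.getD_eq_getElem?_getD, List.getElem?_append_left (by simpa using h)]
    simp only [List.getElem?_replicate]
    rw [if_pos h]
    rfl
  · rw [if_neg (by omega), List.getD_eq_getElem?_getD,
      List.getElem?_append_right (by simpa using h)]
    simp only [List.length_replicate, List.getElem?_replicate]
    rw [if_pos (by omega)]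
    rfl

-- loop invariant for A's fold
theorem pv_loop (left q r : Int) (fN : Nat) (hq : 0 ≤ q) (hr : 0 ≤ r)
    (hq0 : q = 0 → 1 ≤ r) (sizes : List Int)
    (hget : ∀ j : Nat, j < fN → sizes.getD j 0 = if j < r.toNat then q + 1 else q)
    (m : Nat) (hm : m ≤ fN) :
    (List.range m).foldl
      (fun (st : Int × List Int) j =>
        let pfx := st.1 + sizes.getD j 0
        let idx := left + pfx - 1
        if st.2 = [] ∨ idx > st.2.getLastD 0 then (pfx, st.2 ++ [idx])
        else (pfx, st.2))
      (0, [])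
    = ((m : Int) * q + min (m : Int) r,
       pvOut left q r (if q = 0 then min m r.toNat else m)) := by
  induction m with
  | zero =>
    simp [pvOut, min_eq_left hr]
  | succ m ih =>
    have hmf : m < fN := by omega
    have hrz : (r.toNat : Int) = r := Int.toNat_of_nonneg hr
    rw [List.range_succ, List.foldl_append, ih (by omega), List.foldl_cons, List.foldl_nil]
    simp only [hget m hmf]
    by_cases hq' : q = 0
    · subst hq'
      have hr1 : 1 ≤ r := hq0 rfl
      simp only [eq_self_iff_true, if_true]
      by_cases hmr : m < r.toNat
      · rw [show min m r.toNat = m by omega, if_pos hmr, if_pos ?_]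
        · simp only [Prod.mk.injEq]
          constructor
          · omega
          · rw [show min (m + 1) r.toNat = m + 1 by omega, pvOut_succ]
            congr 1
            simp only [List.cons.injEq, and_true]
            omega
        · rcases Nat.eq_zero_or_pos m with h0 | h0
          · subst h0; left; simp [pvOut]
          · right
            rw [pvOut_getLastD _ _ _ _ h0]
            omega
      · rw [show min m r.toNat = r.toNat by omega, if_neg hmr, if_neg ?_]
        · simp only [Prod.mk.injEq]
          constructor
          · omega
          · rw [show min (m + 1) r.toNat = r.toNat by omega]
        · push_neg
          refine ⟨pvOut_ne_nil _ _ _ _ (by omega), ?_⟩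
          rw [pvOut_getLastD _ _ _ _ (by omega)]
          omega
    · have hq1 : 1 ≤ q := by omega
      simp only [if_neg hq']
      rw [if_pos ?_]
      · simp only [Prod.mk.injEq]
        constructor
        · rcases lt_or_ge (m : Int) r with h | h
          · rw [show min (↑(m+1) : Int) r = (↑(m+1) : Int) by omega,
              show min (↑m : Int) r = (↑m : Int) by omega,
              if_pos (show m < r.toNat by omega)]
            push_cast; ring
          · rw [show min (↑(m+1) : Int) r = r by omega,
              show min (↑m : Int) r = r by omega,
              if_neg (show ¬ m < r.toNat by omega)]
            push_cast; ring
        · rw [pvOut_succ]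
          congr 1
          simp only [List.cons.injEq, and_true]
          rcases lt_or_ge (m : Int) r with h | h
          · rw [show min ((↑m : Int) + 1) r = (↑m : Int) + 1 by omega,
              show min (↑m : Int) r = (↑m : Int) by omega,
              if_pos (show m < r.toNat by omega)]
            push_cast; ring
          · rw [show min ((↑m : Int) + 1) r = r by omega,
              show min (↑m : Int) r = r by omega,
              if_neg (show ¬ m < r.toNat by omega)]
            push_cast; ring
      · rcases Nat.eq_zero_or_pos m with h0 | h0
        · subst h0; left; simp [pvOut]
        · right
          rw [pvOut_getLastD _ _ _ _ h0]
          rcases lt_or_ge (m : Int) r with h | h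
          · rw [if_pos (show m < r.toNat by omega)]
            have hmm : min ((m : Int) + 1)  r ≥ min (m : Int) r := by omega
            linarith
          · rw [if_neg (show ¬ m < r.toNat by omega)]
            have hmm : min ((m : Int) + 1) r ≥ min (m : Int) r := by omega
            linarith

-- ===== VERDICT (by name: the statement is the Claim_ definition above) =====
theorem compute_indices_spec : Claim_equal_compute_indices := by
  unfold Claim_equal_compute_indices Spec_compute_indices
  intro left right f _
  simp only [compute_indices, compute_indices_alt]
  by_cases hg : f ≤ 1 ∨ right - left + 1 ≤ 1
  · rw [if_pos hg, if_pos hg]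
  · rw [if_neg hg, if_neg hg]
    push_neg at hg
    obtain ⟨hf, hn2⟩ := hg
    set n := right - left + 1 with hndef
    set q := PySem.Int.floordiv n f with hqdef
    set r := PySem.Int.mod n f with hrdef
    have hf0 : 0 < f := by omega
    have hr0 : 0 ≤ r := by
      rw [hrdef, PySem.Int.mod_eq_emod_of_pos hf0]
      exact Int.emod_nonneg _ (by omega)
    have hrf : r < f := by
      rw [hrdef, PySem.Int.mod_eq_emod_of_pos hf0]
      exact Int.emod_lt_of_pos _ hf0
    have hq0 : 0 ≤ q := by
      rw [hqdef, PySem.Int.floordiv_eq_ediv_of_pos hf0]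
      exact Int.ediv_nonneg (by omega) (by omega)
    have hdm : q * f + r = n := PySem.Int.floordiv_mul_add_mod n f
    have hq0' : q = 0 → 1 ≤ r := by intro h; rw [h] at hdm; omega
    have hrz : (r.toNat : Int) = r := Int.toNat_of_nonneg hr0
    have hlen : (List.replicate r.toNat (q + 1) ++ List.replicate (f - r).toNat q).length
        = f.toNat := by
      simp only [List.length_append, List.length_replicate]
      omega
    rw [hlen]
    rw [pv_loop left q r f.toNat hq0 hr0 hq0'
      (List.replicate r.toNat (q + 1) ++ List.replicate (f - r).toNat q)
      (fun j hj => pv_sizes_getD q r (f - r).toNat j (by omega))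
      (f.toNat - 1) (by omega)]
    by_cases hqz : q = 0
    · rw [if_pos hqz, if_pos hqz]
      have hnr : n = r := by rw [hqz] at hdm; omega
      rw [show min (f.toNat - 1) r.toNat = r.toNat by omega]
      rw [PySem.List.pyRange_one]
      rw [show (right + 1 - left).toNat = r.toNat by omega]
      simp only [pvOut]
      apply List.map_congr_left
      intro j hj
      rw [List.mem_range] at hj
      rw [hqz]
      omega
    · rw [if_neg hqz, if_neg hqz]
      rw [PySem.List.pyRange_one]
      rw [show (f - 1).toNat = f.toNat - 1 by omega]
      simp only [pvOut, List.map_map]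
      apply List.map_congr_left
      intro j hj
      simp only [Function.comp_apply]
      rw [show (1 : Int) + (j : Int) = (j : Int) + 1 by ring]
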